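-- pv_equiv track=rewrite | github.com/guitarbeat/multiphoton_guide | modules/analysis/usaf_analyzer.py | find_line_pairs
-- ===== SOURCE A (Python) =====
-- def find_best_two_line_pairs(dark_bar_starts):
--     """
--     Given a list of dark bar starts, find the two consecutive pairs whose widths are most similar.
--     Returns the two pairs and their average width.
--     """
--     pairs = [
--         (dark_bar_starts[i], dark_bar_starts[i + 1])
--         for i in range(len(dark_bar_starts) - 1)
--     ]
--     widths = [end - start for start, end in pairs]
--     if len(widths) < 2:
--         return [], 0.0  # Not enough pairs
--     # Find the two widths that are closest to each other
--     min_diff = float("inf")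
--     best_indices = (0, 1)
--     for i in range(len(widths)):
--         for j in range(i + 1, len(widths)):
--             diff = abs(widths[i] - widths[j])
--             if diff < min_diff:
--                 min_diff = diff
--                 best_indices = (i, j)
--     # Get the best two pairs and their average width
--     best_pairs = [pairs[best_indices[0]], pairs[best_indices[1]]]
--     avg_width = (widths[best_indices[0]] + widths[best_indices[1]]) / 2
--     return best_pairs, avg_width
--
-- def find_line_pairs(boundaries, roi_img):
--     """
--     Find and return only the two best-matching line pairs for annotation.
--     """
--     best_pairs, _ = find_best_two_line_pairs(boundaries)
--     line_pairs = []
--     for j, (start_pos, end_pos) in enumerate(best_pairs):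
--         width_px = end_pos - start_pos
--         if width_px >= 5:
--             line_pairs.append((start_pos, end_pos, width_px, j))
--     return line_pairs
-- ===== SOURCE B (Python) =====
-- def find_line_pairs(boundaries, roi_img):
--     """
--     Find and return only the two best-matching line pairs for annotation.
--
--     Faster strategy: the minimum |width[i]-width[j]| over all pairs equals the
--     minimum adjacent gap in sorted(widths); the lexicographically-first index
--     pair attaining it is recovered with a last-occurrence table, no O(n^2) scan.
--     """
--     n = len(boundaries)
--     if n < 3:
--         return []
--     widths = [boundaries[k + 1] - boundaries[k] for k in range(n - 1)]
--     m = len(widths)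
--     s = sorted(widths)
--     d = min(s[t + 1] - s[t] for t in range(m - 1))
--     last = {}
--     for k, w in enumerate(widths):
--         last[w] = k
--     bi = next(i for i in range(m)
--               if last.get(widths[i] - d, -1) > i or last.get(widths[i] + d, -1) > i)
--     bj = next(j for j in range(bi + 1, m) if abs(widths[bi] - widths[j]) == d)
--     line_pairs = []
--     for j, (start_pos, end_pos) in enumerate(
--         [(boundaries[bi], boundaries[bi + 1]), (boundaries[bj], boundaries[bj + 1])]
--     ):
--         width_px = end_pos - start_pos
--         if width_px >= 5:
--             line_pairs.append((start_pos, end_pos, width_px, j))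
--     return line_pairs
-- ===== Notes on version B (the rewrite author's own statement) =====
-- stated objective: faster
-- what changed: Replaces A's O(n^2) all-pairs scan for the most similar widths by sorting the widths to get the minimum pairwise gap from adjacent sorted elements, then reconstructing the lexicographically-first original index pair with a last-occurrence dictionary and two linear scans.
import Mathlib
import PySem

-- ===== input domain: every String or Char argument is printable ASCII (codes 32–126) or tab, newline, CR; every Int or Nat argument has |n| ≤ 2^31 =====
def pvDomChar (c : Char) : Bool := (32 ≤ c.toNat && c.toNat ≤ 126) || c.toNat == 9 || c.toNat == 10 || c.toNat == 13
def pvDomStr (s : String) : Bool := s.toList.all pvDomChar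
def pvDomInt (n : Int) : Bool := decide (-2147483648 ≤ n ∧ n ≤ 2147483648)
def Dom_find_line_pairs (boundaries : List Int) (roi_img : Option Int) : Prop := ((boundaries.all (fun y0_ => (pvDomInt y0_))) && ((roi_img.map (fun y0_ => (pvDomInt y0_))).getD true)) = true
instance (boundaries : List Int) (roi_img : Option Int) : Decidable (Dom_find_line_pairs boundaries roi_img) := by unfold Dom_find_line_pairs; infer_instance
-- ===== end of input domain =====

-- B replaces A's O(n^2) all-pairs similarity scan by sort + last-occurrence dictionary (O(n log n)).

-- ===== PORT A =====
-- A's helper returns (best_pairs, avg_width); find_line_pairs discards the float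
-- avg_width, which is not representable under the type convention, so the port
-- returns best_pairs only (exact for the return value proved about).
-- the body of A's inner loop (compare diff with the running minimum), as a named helper;
-- min_diff = float("inf") is ported as `none`, and any diff is < inf
def pvAbody (widths : List Int) (st : Option Int × Int × Int) (i j : Int) :
    Option Int × Int × Int :=
  let diff := |PySem.List.pyGetD widths i 0 - PySem.List.pyGetD widths j 0|
  match st.1 with
  | none => (some diff, i, j)
  | some md => if diff < md then (some diff, i, j) else st

def find_best_two_line_pairs (dark_bar_starts : List Int) : List (Int × Int) :=
  let pairs := (PySem.List.pyRange 0 ((dark_bar_starts.length : Int) - 1) 1).map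
    (fun i => (PySem.List.pyGetD dark_bar_starts i 0, PySem.List.pyGetD dark_bar_starts (i + 1) 0))
  let widths := pairs.map (fun p => p.2 - p.1)
  if widths.length < 2 then []
  else
    let best := (PySem.List.pyRange 0 (widths.length : Int) 1).foldl
      (fun (st : Option Int × Int × Int) i =>
        (PySem.List.pyRange (i + 1) (widths.length : Int) 1).foldl
          (fun (st : Option Int × Int × Int) j => pvAbody widths st i j) st)
      (none, 0, 1)
    [PySem.List.pyGetD pairs best.2.1 (0, 0), PySem.List.pyGetD pairs best.2.2 (0, 0)]

def find_line_pairs (boundaries : List Int) (roi_img : Option Int) : List (Int × Int × Int × Int) :=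
  let best_pairs := find_best_two_line_pairs boundaries
  (PySem.List.enumerate best_pairs 0).foldl
    (fun acc jp =>
      let width_px := jp.2.2 - jp.2.1
      if width_px ≥ 5 then acc ++ [(jp.2.1, jp.2.2, width_px, jp.1)] else acc) []

-- ===== PORT B =====
def find_line_pairs_alt (boundaries : List Int) (roi_img : Option Int) : List (Int × Int × Int × Int) :=
  let n : Int := boundaries.length
  if n < 3 then []
  else
    let widths := (PySem.List.pyRange 0 (n - 1) 1).map
      (fun k => PySem.List.pyGetD boundaries (k + 1) 0 - PySem.List.pyGetD boundaries k 0)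
    let m : Int := widths.length
    let s := PySem.List.sorted widths (fun x => x) false
    -- `min(...)`: the generator is nonempty (m ≥ 2), so Python's min cannot raise;
    -- the `.getD 0` default is unreachable
    let d := (PySem.List.min? ((PySem.List.pyRange 0 (m - 1) 1).map
        (fun t => PySem.List.pyGetD s (t + 1) 0 - PySem.List.pyGetD s t 0))
        (fun x => x)).getD 0
    let last := (PySem.List.enumerate widths 0).foldl
      (fun (dd : PySem.Dict Int Int) kw => dd.insert kw.2 kw.1) PySem.Dict.empty
    -- `next(...)`: d is attained by some pair, so both generators are nonempty;
    -- the `.getD 0` defaults are unreachable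
    let bi := ((PySem.List.pyRange 0 m 1).find?
        (fun i => decide (last.getD (PySem.List.pyGetD widths i 0 - d) (-1) > i
                        ∨ last.getD (PySem.List.pyGetD widths i 0 + d) (-1) > i))).getD 0
    let bj := ((PySem.List.pyRange (bi + 1) m 1).find?
        (fun j => |PySem.List.pyGetD widths bi 0 - PySem.List.pyGetD widths j 0| == d)).getD 0
    (PySem.List.enumerate
        [(PySem.List.pyGetD boundaries bi 0, PySem.List.pyGetD boundaries (bi + 1) 0),
         (PySem.List.pyGetD boundaries bj 0, PySem.List.pyGetD boundaries (bj + 1) 0)] 0).foldl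
      (fun acc jp =>
        let width_px := jp.2.2 - jp.2.1
        if width_px ≥ 5 then acc ++ [(jp.2.1, jp.2.2, width_px, jp.1)] else acc) []

-- ===== PRECONDITION & SPEC =====
def Spec_find_line_pairs (boundaries : List Int) (roi_img : Option Int) (out : List (Int × Int × Int × Int)) : Prop := out = find_line_pairs_alt boundaries roi_img
instance (boundaries : List Int) (roi_img : Option Int) (out : List (Int × Int × Int × Int)) : Decidable (Spec_find_line_pairs boundaries roi_img out) := by unfold Spec_find_line_pairs; infer_instance

-- ===== CLAIM (what is proved, stated in full; the proofs are below) =====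
def Claim_equal_find_line_pairs : Prop := ∀ (boundaries : List Int) (roi_img : Option Int), Dom_find_line_pairs boundaries roi_img → Spec_find_line_pairs boundaries roi_img (find_line_pairs boundaries roi_img)

-- ===== LEMMAS AND PROOFS =====

-- the widths list both programs work on
def pvW (b : List Int) : List Int :=
  (PySem.List.pyRange 0 ((b.length : Int) - 1) 1).map
    (fun k => PySem.List.pyGetD b (k + 1) 0 - PySem.List.pyGetD b k 0)

-- A's loop step on abstract elements
def pvStep {α : Type} (f : α → Int) (st : Option Int × α) (x : α) : Option Int × α :=
  match st.1 with
  | none => (some (f x), x)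
  | some md => if f x < md then (some (f x), x) else st

-- the lexicographically ordered list of index pairs A scans
def pvP (m : Int) : List (Int × Int) :=
  (PySem.List.pyRange 0 m 1).flatMap
    (fun i => (PySem.List.pyRange (i + 1) m 1).map (fun j => (i, j)))

def pvF (ws : List Int) (p : Int × Int) : Int :=
  |PySem.List.pyGetD ws p.1 0 - PySem.List.pyGetD ws p.2 0|

def pvLast (ws : List Int) : PySem.Dict Int Int :=
  (PySem.List.enumerate ws 0).foldl (fun dd kw => dd.insert kw.2 kw.1) PySem.Dict.empty

def pvS (ws : List Int) : List Int := PySem.List.sorted ws (fun x => x) false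

def pvDL (ws : List Int) : List Int :=
  (PySem.List.pyRange 0 ((ws.length : Int) - 1) 1).map
    (fun t => PySem.List.pyGetD (pvS ws) (t + 1) 0 - PySem.List.pyGetD (pvS ws) t 0)

def pvD (ws : List Int) : Int := (PySem.List.min? (pvDL ws) (fun x => x)).getD 0

-- ---- generic first-strict-min fold ----

lemma pvMin?_cons {α : Type} (f : α → Int) (x : α) (t : List α) {Mt : Int}
    (ht : (t.map f).min? = some Mt) : ((x :: t).map f).min? = some (min (f x) Mt) := by
  obtain ⟨hmem, hlb⟩ := List.min?_eq_some_iff.mp ht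
  rw [List.map_cons]
  apply List.min?_eq_some_iff.mpr
  refine ⟨?_, ?_⟩
  · rcases le_total (f x) Mt with h | h
    · rw [min_eq_left h]; exact List.mem_cons_self ..
    · rw [min_eq_right h]; exact List.mem_cons_of_mem _ hmem
  · intro y hy
    rcases List.mem_cons.mp hy with h | h
    · subst h; exact min_le_left _ _
    · exact le_trans (min_le_right _ _) (hlb _ h)

lemma pvFoldA_some {α : Type} (f : α → Int) (l : List α) : ∀ (c : Int) (b : α),
    l.foldl (pvStep f) (some c, b) =
      ((l.map f).min?).elim (some c, b)
        (fun M => if M < c then (some M, (l.find? (fun x => f x == M)).getD b)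
                  else (some c, b)) := by
  induction l with
  | nil => intro c b; simp
  | cons x t ih =>
    intro c b
    rw [List.foldl_cons]
    have hstep : pvStep f (some c, b) x = if f x < c then (some (f x), x) else (some c, b) := rfl
    rcases ht : (t.map f).min? with _ | Mt
    · have ht' : t = [] := List.map_eq_nil_iff.mp (List.min?_eq_none_iff.mp ht)
      subst ht'
      rw [hstep]
      by_cases hc : f x < c
      · simp [hc]
      · simp [hc]
    · have hcons := pvMin?_cons f x t ht
      have hMtmem := (List.min?_eq_some_iff.mp ht).1
      obtain ⟨y, hy, hyy⟩ := List.mem_map.mp hMtmem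
      obtain ⟨pt, hpt⟩ :=
        Option.isSome_iff_exists.mp
          ((List.find?_isSome (xs := t) (p := fun y => f y == Mt)).mpr
            ⟨y, hy, by simp [hyy]⟩)
      rw [hstep, hcons]
      simp only [Option.elim_some]
      by_cases hc : f x < c
      · rw [if_pos hc, ih (f x) x, ht]
        simp only [Option.elim_some]
        by_cases hmt : Mt < f x
        · have hmin : min (f x) Mt = Mt := min_eq_right (le_of_lt hmt)
          have hMc : Mt < c := lt_trans hmt hc
          rw [if_pos hmt, hmin, if_pos hMc]
          have hx : ¬ ((fun y => f y == Mt) x) = true := by simp; omega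
          rw [List.find?_cons_of_neg (p := fun y => f y == Mt) hx, hpt]
          rfl
        · have hmin : min (f x) Mt = f x := min_eq_left (not_lt.mp hmt)
          rw [if_neg hmt, hmin, if_pos hc]
          have hx : ((fun y => f y == f x) x) = true := by simp
          rw [List.find?_cons_of_pos (p := fun y => f y == f x) hx]
          rfl
      · rw [if_neg hc, ih c b, ht]
        simp only [Option.elim_some]
        have hcx : c ≤ f x := not_lt.mp hc
        by_cases hmt : Mt < c
        · have hmin : min (f x) Mt = Mt := min_eq_right (le_of_lt (lt_of_lt_of_le hmt hcx))
          rw [hmin, if_pos hmt, if_pos hmt]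
          have hx : ¬ ((fun y => f y == Mt) x) = true := by simp; omega
          rw [List.find?_cons_of_neg (p := fun y => f y == Mt) hx]
        · have hnlt : ¬ (min (f x) Mt < c) := not_lt.mpr (le_min hcx (not_lt.mp hmt))
          rw [if_neg hmt, if_neg hnlt]

lemma pvFoldA_main {α : Type} (f : α → Int) (l : List α) (hl : l ≠ []) (b0 : α) :
    ∃ M p, (l.map f).min? = some M ∧ l.find? (fun y => f y == M) = some p ∧
      l.foldl (pvStep f) (none, b0) = (some M, p) := by
  obtain ⟨x, t, rfl⟩ := List.exists_cons_of_ne_nil hl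
  have h1 : (x :: t).foldl (pvStep f) (none, b0) = t.foldl (pvStep f) (some (f x), x) := rfl
  rcases ht : (t.map f).min? with _ | Mt
  · have ht' : t = [] := List.map_eq_nil_iff.mp (List.min?_eq_none_iff.mp ht)
    subst ht'
    refine ⟨f x, x, by simp, ?_, by rw [h1, List.foldl_nil]⟩
    exact List.find?_cons_of_pos (p := fun y => f y == f x) (by simp)
  · have hcons := pvMin?_cons f x t ht
    have hMtmem := (List.min?_eq_some_iff.mp ht).1
    rw [h1, pvFoldA_some f t (f x) x, ht]
    simp only [Option.elim_some]
    by_cases hmt : Mt < f x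
    · have hmin : min (f x) Mt = Mt := min_eq_right (le_of_lt hmt)
      obtain ⟨y, hy, hyy⟩ := List.mem_map.mp hMtmem
      obtain ⟨pt, hpt⟩ :=
        Option.isSome_iff_exists.mp
          ((List.find?_isSome (xs := t) (p := fun y => f y == Mt)).mpr
            ⟨y, hy, by simp [hyy]⟩)
      refine ⟨Mt, pt, by rw [hcons, hmin], ?_, ?_⟩
      · have hx : ¬ ((fun y => f y == Mt) x) = true := by simp; omega
        rw [List.find?_cons_of_neg (p := fun y => f y == Mt) hx, hpt]
      · rw [if_pos hmt, hpt]
        rfl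
    · have hmin : min (f x) Mt = f x := min_eq_left (not_lt.mp hmt)
      refine ⟨f x, x, by rw [hcons, hmin], ?_, ?_⟩
      · exact List.find?_cons_of_pos (p := fun y => f y == f x) (by simp)
      · rw [if_neg hmt]

-- ---- find? plumbing ----

lemma pvFind?_flatMap {α β : Type} (g : α → List β) (q : β → Bool) (l : List α) :
    (l.flatMap g).find? q = l.findSome? (fun a => (g a).find? q) := by
  induction l with
  | nil => rfl
  | cons x t ih =>
    rw [List.flatMap_cons, List.find?_append, List.findSome?_cons, ih]
    cases h : (g x).find? q <;> simp [h]

lemma pvFindSome?_map {α β γ : Type} (l : List α) (F : α → Option β) (h : α → β → γ) :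
    l.findSome? (fun a => (F a).map (h a)) =
      (l.find? (fun a => (F a).isSome)).elim none (fun a => (F a).map (h a)) := by
  induction l with
  | nil => rfl
  | cons x t ih =>
    rw [List.findSome?_cons]
    cases hF : F x with
    | none =>
      rw [List.find?_cons_of_neg (p := fun a => (F a).isSome) (by simp [hF]), ← ih]
      simp [hF]
    | some v =>
      rw [List.find?_cons_of_pos (p := fun a => (F a).isSome) (by simp [hF])]
      simp [hF]

lemma pvFind?_congr {α : Type} (l : List α) (p q : α → Bool) (h : ∀ a ∈ l, p a = q a) :
    l.find? p = l.find? q := by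
  induction l with
  | nil => rfl
  | cons x t ih =>
    have hx := h x (List.mem_cons_self ..)
    have ht := ih (fun a ha => h a (List.mem_cons_of_mem _ ha))
    cases hq : q x
    · rw [List.find?_cons_of_neg (p := p) (by simp [hx, hq]),
        List.find?_cons_of_neg (p := q) (by simp [hq]), ht]
    · rw [List.find?_cons_of_pos (p := p) (by simp [hx, hq]),
        List.find?_cons_of_pos (p := q) (by simp [hq])]

-- ---- counting positions ----

lemma pvCount_two {l : List Int} {x : Int} (h : 2 ≤ l.count x) :
    ∃ a b : Nat, a < b ∧ l[a]? = some x ∧ l[b]? = some x := by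
  induction l with
  | nil => simp at h
  | cons y t ih =>
    by_cases hyx : y = x
    · have hcc : (y :: t).count x = t.count x + 1 := by
        rw [hyx, List.count_cons_self]
      have hmem : x ∈ t := List.count_pos_iff.mp (by omega)
      obtain ⟨n, hn⟩ := List.mem_iff_getElem?.mp hmem
      refine ⟨0, n + 1, by omega, by simp [hyx], by simpa using hn⟩
    · have h' : 2 ≤ t.count x := by
        rwa [List.count_cons_of_ne (a := x) (b := y) (by omega)] at h
      obtain ⟨a, b, hab, ha, hb⟩ := ih h'
      exact ⟨a + 1, b + 1, by omega, by simpa using ha, by simpa using hb⟩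

lemma pvCount_two_of {x : Int} : ∀ {l : List Int} {a b : Nat}, a < b →
    l[a]? = some x → l[b]? = some x → 2 ≤ l.count x := by
  intro l
  induction l with
  | nil => intro a b _ ha _; simp at ha
  | cons y t ih =>
    intro a b hab ha hb
    cases a with
    | zero =>
      have hy : y = x := by simpa using ha
      obtain ⟨b', rfl⟩ : ∃ b', b = b' + 1 := ⟨b - 1, by omega⟩
      have hbt : t[b']? = some x := by simpa using hb
      have hmem : x ∈ t := List.mem_iff_getElem?.mpr ⟨b', hbt⟩
      have hpos : 0 < t.count x := List.count_pos_iff.mpr hmem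
      subst hy
      rw [List.count_cons_self]
      omega
    | succ a' =>
      obtain ⟨b', rfl⟩ : ∃ b', b = b' + 1 := ⟨b - 1, by omega⟩
      have h2 := ih (a := a') (b := b') (by omega) (by simpa using ha) (by simpa using hb)
      rw [List.count_cons]
      omega

-- ---- the minimum gap d ----

lemma pvS_length (ws : List Int) : (pvS ws).length = ws.length :=
  PySem.List.length_sorted ws (fun x => x) false

lemma pvS_mono (ws : List Int) {p q : Nat} (hpq : p ≤ q) (hq : q < (pvS ws).length) :
    (pvS ws)[p]'(lt_of_le_of_lt hpq hq) ≤ (pvS ws)[q] :=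
  PySem.List.sorted_id_getElem_mono ws hpq hq

lemma pvGet?_pyGetD (l : List Int) {k : Nat} {v : Int} (h : l[k]? = some v) :
    PySem.List.pyGetD l ((k : Int)) 0 = v := by
  have hkl : k < l.length := (List.getElem?_eq_some_iff.mp h).1
  have hv := (List.getElem?_eq_some_iff.mp h).2
  rw [PySem.List.pyGetD_eq_getElem _ _ (by omega) (by exact_mod_cast hkl)]
  simpa using hv

lemma pvDL_elem (ws : List Int) {t : Int} (h0 : 0 ≤ t) (h1 : t < (ws.length : Int) - 1) :
    PySem.List.pyGetD (pvS ws) (t + 1) 0 - PySem.List.pyGetD (pvS ws) t 0 ∈ pvDL ws :=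
  List.mem_map.mpr ⟨t, PySem.List.mem_pyRange_one.mpr ⟨h0, h1⟩, rfl⟩

lemma pvDL_ne_nil (ws : List Int) (h2 : 2 ≤ ws.length) : pvDL ws ≠ [] := by
  intro h
  have := congrArg List.length h
  rw [pvDL, List.length_map, PySem.List.length_pyRange_one] at this
  simp at this
  omega

lemma pvD_le_dl (ws : List Int) {t : Int} (h0 : 0 ≤ t) (h1 : t < (ws.length : Int) - 1) :
    pvD ws ≤ PySem.List.pyGetD (pvS ws) (t + 1) 0 - PySem.List.pyGetD (pvS ws) t 0 := by
  have h2 : 2 ≤ ws.length := by omega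
  rcases hmin : PySem.List.min? (pvDL ws) (fun x => x) with _ | d0
  · exact absurd ((PySem.List.min?_eq_none_iff _ _).mp hmin) (pvDL_ne_nil ws h2)
  · have hle := PySem.List.min?_isMin hmin _ (pvDL_elem ws h0 h1)
    have hD : pvD ws = d0 := by rw [pvD, hmin]; rfl
    rw [hD]
    exact hle

lemma pvD_mem_dl (ws : List Int) (h2 : 2 ≤ ws.length) :
    ∃ t : Int, 0 ≤ t ∧ t < (ws.length : Int) - 1 ∧
      pvD ws = PySem.List.pyGetD (pvS ws) (t + 1) 0 - PySem.List.pyGetD (pvS ws) t 0 := by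
  rcases hmin : PySem.List.min? (pvDL ws) (fun x => x) with _ | d0
  · exact absurd ((PySem.List.min?_eq_none_iff _ _).mp hmin) (pvDL_ne_nil ws h2)
  · have hm := PySem.List.min?_mem hmin
    obtain ⟨t, ht, htt⟩ := List.mem_map.mp hm
    have ht' := PySem.List.mem_pyRange_one.mp ht
    refine ⟨t, ht'.1, ht'.2, ?_⟩
    have hD : pvD ws = d0 := by rw [pvD, hmin]; rfl
    rw [hD, ← htt]

lemma pvCount_sorted (ws : List Int) (u : Int) : (pvS ws).count u = ws.count u :=
  (PySem.List.sorted_perm ws (fun x => x) false).count_eq u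

lemma pvD_le_zero_of_dup (ws : List Int) {u : Int} (h2 : 2 ≤ ws.length)
    (hc : 2 ≤ ws.count u) : pvD ws ≤ 0 := by
  have hcs : 2 ≤ (pvS ws).count u := by rw [pvCount_sorted]; exact hc
  obtain ⟨a, b, hab, ha, hb⟩ := pvCount_two hcs
  have hbl : b < (pvS ws).length := (List.getElem?_eq_some_iff.mp hb).1
  have hal1 : a + 1 < (pvS ws).length := by omega
  have hua : PySem.List.pyGetD (pvS ws) ((a : Int)) 0 = u := pvGet?_pyGetD _ ha
  have hub : PySem.List.pyGetD (pvS ws) ((b : Int)) 0 = u := pvGet?_pyGetD _ hb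
  have hsl := pvS_length ws
  have hta : ((a : Int)) < (ws.length : Int) - 1 := by omega
  have hd := pvD_le_dl ws (t := (a : Int)) (by omega) hta
  have hg2 : PySem.List.pyGetD (pvS ws) ((a : Int) + 1) 0 = (pvS ws)[a + 1]'hal1 := by
    have hcast : ((a : Int)) + 1 = (((a + 1 : Nat)) : Int) := by push_cast; ring
    rw [hcast]
    exact pvGet?_pyGetD _ (List.getElem?_eq_getElem hal1)
  have hub' : (pvS ws)[b] = u := (List.getElem?_eq_some_iff.mp hb).2
  have hmono : (pvS ws)[a + 1]'hal1 ≤ (pvS ws)[b] := pvS_mono ws (by omega) hbl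
  rw [hg2, hua] at hd
  omega

lemma pvD_le_of_two_vals (ws : List Int) {u v : Int} (huv : u < v)
    (hu : u ∈ ws) (hv : v ∈ ws) : pvD ws ≤ v - u := by
  have hus : u ∈ pvS ws := ((PySem.List.sorted_perm ws (fun x => x) false).mem_iff).mpr hu
  have hvs : v ∈ pvS ws := ((PySem.List.sorted_perm ws (fun x => x) false).mem_iff).mpr hv
  obtain ⟨a, ha⟩ := List.mem_iff_getElem?.mp hus
  obtain ⟨b, hb⟩ := List.mem_iff_getElem?.mp hvs
  have hal : a < (pvS ws).length := (List.getElem?_eq_some_iff.mp ha).1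
  have hbl : b < (pvS ws).length := (List.getElem?_eq_some_iff.mp hb).1
  have hua : (pvS ws)[a] = u := (List.getElem?_eq_some_iff.mp ha).2
  have hvb : (pvS ws)[b] = v := (List.getElem?_eq_some_iff.mp hb).2
  have hab : a < b := by
    by_contra hle
    have := pvS_mono ws (p := b) (q := a) (by omega) hal
    omega
  have hal1 : a + 1 < (pvS ws).length := by omega
  have hsl := pvS_length ws
  have hta : ((a : Int)) < (ws.length : Int) - 1 := by omega
  have hd := pvD_le_dl ws (t := (a : Int)) (by omega) hta
  have hga : PySem.List.pyGetD (pvS ws) ((a : Int)) 0 = u := pvGet?_pyGetD _ ha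
  have hg2 : PySem.List.pyGetD (pvS ws) ((a : Int) + 1) 0 = (pvS ws)[a + 1]'hal1 := by
    have hcast : ((a : Int)) + 1 = (((a + 1 : Nat)) : Int) := by push_cast; ring
    rw [hcast]
    exact pvGet?_pyGetD _ (List.getElem?_eq_getElem hal1)
  have hmono : (pvS ws)[a + 1]'hal1 ≤ (pvS ws)[b] := pvS_mono ws (by omega) hbl
  rw [hg2, hga] at hd
  omega

lemma pvWs_pyGetD_getElem? (ws : List Int) {i : Int} (h0 : 0 ≤ i) (h1 : i < (ws.length : Int)) :
    ws[i.toNat]? = some (PySem.List.pyGetD ws i 0) := by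
  rw [PySem.List.pyGetD_eq_getElem _ _ h0 h1]
  exact List.getElem?_eq_getElem (by omega)

lemma pvD_lb (ws : List Int) {i j : Int} (h0 : 0 ≤ i) (hij : i < j) (hj : j < (ws.length : Int)) :
    pvD ws ≤ pvF ws (i, j) := by
  have h2 : 2 ≤ ws.length := by omega
  have hgi := pvWs_pyGetD_getElem? ws h0 (by omega)
  have hgj := pvWs_pyGetD_getElem? ws (i := j) (by omega) hj
  set u := PySem.List.pyGetD ws i 0 with hu
  set v := PySem.List.pyGetD ws j 0 with hv
  have hF : pvF ws (i, j) = |u - v| := rfl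
  rcases lt_trichotomy u v with h | h | h
  · have := pvD_le_of_two_vals ws h
      (List.mem_iff_getElem?.mpr ⟨i.toNat, hgi⟩) (List.mem_iff_getElem?.mpr ⟨j.toNat, hgj⟩)
    rw [hF, abs_sub_comm, abs_of_nonneg (by omega)]
    omega
  · have hcnt : 2 ≤ ws.count u := by
      apply pvCount_two_of (a := i.toNat) (b := j.toNat) (by omega) hgi
      rw [← h] at hgj
      exact hgj
    have := pvD_le_zero_of_dup ws h2 hcnt
    rw [hF, h]
    simpa using this
  · have := pvD_le_of_two_vals ws h
      (List.mem_iff_getElem?.mpr ⟨j.toNat, hgj⟩) (List.mem_iff_getElem?.mpr ⟨i.toNat, hgi⟩)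
    rw [hF, abs_of_nonneg (by omega)]
    omega

lemma pvD_nonneg (ws : List Int) (h2 : 2 ≤ ws.length) : 0 ≤ pvD ws := by
  obtain ⟨t, h0, h1, hD⟩ := pvD_mem_dl ws h2
  have hsl := pvS_length ws
  have hb0 : t.toNat < (pvS ws).length := by omega
  have hb1 : t.toNat + 1 < (pvS ws).length := by omega
  have hg1 : PySem.List.pyGetD (pvS ws) t 0 = (pvS ws)[t.toNat]'hb0 := by
    rw [PySem.List.pyGetD_eq_getElem _ _ h0 (by omega)]
  have hg2 : PySem.List.pyGetD (pvS ws) (t + 1) 0 = (pvS ws)[t.toNat + 1]'hb1 := by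
    rw [PySem.List.pyGetD_eq_getElem _ _ (by omega) (by omega)]
    congr 1 <;> omega
  have hmono := pvS_mono ws (p := t.toNat) (q := t.toNat + 1) (by omega) hb1
  rw [hD, hg1, hg2]
  omega

lemma pvD_achieved (ws : List Int) (h2 : 2 ≤ ws.length) :
    ∃ p : Int × Int, 0 ≤ p.1 ∧ p.1 < p.2 ∧ p.2 < (ws.length : Int) ∧ pvF ws p = pvD ws := by
  obtain ⟨t, h0, h1, hD⟩ := pvD_mem_dl ws h2
  have hsl := pvS_length ws
  have hb0 : t.toNat < (pvS ws).length := by omega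
  have hb1 : t.toNat + 1 < (pvS ws).length := by omega
  have hg1 : PySem.List.pyGetD (pvS ws) t 0 = (pvS ws)[t.toNat]'hb0 := by
    rw [PySem.List.pyGetD_eq_getElem _ _ h0 (by omega)]
  have hg2 : PySem.List.pyGetD (pvS ws) (t + 1) 0 = (pvS ws)[t.toNat + 1]'hb1 := by
    rw [PySem.List.pyGetD_eq_getElem _ _ (by omega) (by omega)]
    congr 1 <;> omega
  have hDuv : pvD ws = (pvS ws)[t.toNat + 1]'hb1 - (pvS ws)[t.toNat]'hb0 := by
    rw [hD, hg1, hg2]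
  by_cases huv : (pvS ws)[t.toNat]'hb0 = (pvS ws)[t.toNat + 1]'hb1
  · have hcs : 2 ≤ (pvS ws).count ((pvS ws)[t.toNat]'hb0) :=
      pvCount_two_of (a := t.toNat) (b := t.toNat + 1) (by omega)
        (List.getElem?_eq_getElem hb0) (by rw [List.getElem?_eq_getElem hb1, ← huv])
    have hcw : 2 ≤ ws.count ((pvS ws)[t.toNat]'hb0) := by rw [← pvCount_sorted]; exact hcs
    obtain ⟨a, b, hab, ha, hb⟩ := pvCount_two hcw
    have hbl : b < ws.length := (List.getElem?_eq_some_iff.mp hb).1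
    refine ⟨((a : Int), (b : Int)), by show (0:Int) ≤ (a:Int); omega,
      by show ((a:Int)) < ((b:Int)); omega, by show ((b:Int)) < ((ws.length : Int)); omega, ?_⟩
    have hga := pvGet?_pyGetD ws ha
    have hgb := pvGet?_pyGetD ws hb
    show |PySem.List.pyGetD ws ((a:Int)) 0 - PySem.List.pyGetD ws ((b:Int)) 0| = pvD ws
    rw [hga, hgb, sub_self, abs_zero]
    omega
  · have hlt : (pvS ws)[t.toNat]'hb0 < (pvS ws)[t.toNat + 1]'hb1 := by
      have := pvS_mono ws (p := t.toNat) (q := t.toNat + 1) (by omega) hb1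
      omega
    have humem : (pvS ws)[t.toNat]'hb0 ∈ ws :=
      ((PySem.List.sorted_perm ws (fun x => x) false).mem_iff).mp (List.getElem_mem _)
    have hvmem : (pvS ws)[t.toNat + 1]'hb1 ∈ ws :=
      ((PySem.List.sorted_perm ws (fun x => x) false).mem_iff).mp (List.getElem_mem _)
    obtain ⟨a, ha⟩ := List.mem_iff_getElem?.mp humem
    obtain ⟨b, hb⟩ := List.mem_iff_getElem?.mp hvmem
    have hal : a < ws.length := (List.getElem?_eq_some_iff.mp ha).1
    have hbl : b < ws.length := (List.getElem?_eq_some_iff.mp hb).1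
    have hga := pvGet?_pyGetD ws ha
    have hgb := pvGet?_pyGetD ws hb
    have hne : a ≠ b := by
      intro hh
      subst hh
      rw [ha] at hb
      have := Option.some.inj hb
      omega
    rcases Nat.lt_or_ge a b with hab | hab
    · refine ⟨((a : Int), (b : Int)), by show (0:Int) ≤ (a:Int); omega,
        by show ((a:Int)) < ((b:Int)); omega, by show ((b:Int)) < ((ws.length:Int)); omega, ?_⟩
      show |PySem.List.pyGetD ws ((a:Int)) 0 - PySem.List.pyGetD ws ((b:Int)) 0| = pvD ws
      rw [hga, hgb, abs_sub_comm, abs_of_nonneg (by omega)]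
      omega
    · have hba : b < a := by omega
      refine ⟨((b : Int), (a : Int)), by show (0:Int) ≤ (b:Int); omega,
        by show ((b:Int)) < ((a:Int)); omega, by show ((a:Int)) < ((ws.length:Int)); omega, ?_⟩
      show |PySem.List.pyGetD ws ((b:Int)) 0 - PySem.List.pyGetD ws ((a:Int)) 0| = pvD ws
      rw [hgb, hga, abs_of_nonneg (by omega)]
      omega

lemma pvMem_P {m : Int} {p : Int × Int} : p ∈ pvP m ↔ 0 ≤ p.1 ∧ p.1 < p.2 ∧ p.2 < m := by
  constructor
  · intro hp
    obtain ⟨i, hi, hp2⟩ := List.mem_flatMap.mp hp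
    obtain ⟨j, hj, rfl⟩ := List.mem_map.mp hp2
    have hi' := PySem.List.mem_pyRange_one.mp hi
    have hj' := PySem.List.mem_pyRange_one.mp hj
    exact ⟨hi'.1, by show i < j; omega, by show j < m; omega⟩
  · rintro ⟨h1, h2, h3⟩
    apply List.mem_flatMap.mpr
    refine ⟨p.1, PySem.List.mem_pyRange_one.mpr ⟨h1, by omega⟩, ?_⟩
    exact List.mem_map.mpr ⟨p.2, PySem.List.mem_pyRange_one.mpr ⟨by omega, h3⟩, by simp⟩

lemma pvMinP (ws : List Int) (h2 : 2 ≤ ws.length) :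
    ((pvP (ws.length : Int)).map (pvF ws)).min? = some (pvD ws) := by
  apply List.min?_eq_some_iff.mpr
  constructor
  · obtain ⟨p, h1, hlt, h3, h4⟩ := pvD_achieved ws h2
    exact List.mem_map.mpr ⟨p, pvMem_P.mpr ⟨h1, hlt, h3⟩, h4⟩
  · intro y hy
    obtain ⟨p, hp, rfl⟩ := List.mem_map.mp hy
    obtain ⟨h1, hlt, h3⟩ := pvMem_P.mp hp
    have := pvD_lb ws h1 hlt h3
    simpa using this

-- ---- the last-occurrence dictionary ----

lemma pvLast_append (ws : List Int) (x : Int) :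
    pvLast (ws ++ [x]) = (pvLast ws).insert x (ws.length : Int) := by
  rw [pvLast, pvLast, PySem.List.enumerate_append, List.foldl_append]
  simp [PySem.List.enumerate_cons, PySem.List.enumerate_nil]

lemma pvLast_gt (ws : List Int) (v i : Int) (hi : 0 ≤ i) :
    ((pvLast ws).getD v (-1) > i) ↔ ∃ k : Nat, i < (k : Int) ∧ ws[k]? = some v := by
  induction ws using List.reverseRecOn with
  | nil =>
    have hE : (pvLast ([] : List Int)).getD v (-1) = -1 := rfl
    rw [hE]
    constructor
    · intro h; exact absurd h (by omega)
    · rintro ⟨k, _, hk⟩; simp at hk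
  | append_singleton ws x ih =>
    rw [pvLast_append]
    by_cases hv : v = x
    · subst hv
      rw [PySem.Dict.getD_insert_self]
      constructor
      · intro h
        exact ⟨ws.length, h, by simp⟩
      · rintro ⟨k, hk1, hk2⟩
        have hk3 : k < ws.length + 1 := by
          have := (List.getElem?_eq_some_iff.mp hk2).1
          simpa using this
        omega
    · rw [PySem.Dict.getD_insert_of_ne _ _ _ hv, ih]
      constructor
      · rintro ⟨k, h1, h2⟩
        have hkl : k < ws.length := (List.getElem?_eq_some_iff.mp h2).1
        exact ⟨k, h1, by rw [List.getElem?_append_left hkl]; exact h2⟩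
      · rintro ⟨k, h1, h2⟩
        have hkl : k < ws.length + 1 := by
          have := (List.getElem?_eq_some_iff.mp h2).1
          simpa using this
        rcases Nat.lt_or_ge k ws.length with hk | hk
        · exact ⟨k, h1, by rw [List.getElem?_append_left hk] at h2; exact h2⟩
        · exfalso
          have hkk : k = ws.length := by omega
          subst hkk
          rw [List.getElem?_append_right (le_refl _)] at h2
          simp at h2
          exact hv h2.symm

-- ---- the search condition ----

lemma pvCond_iff (ws : List Int) (h2 : 2 ≤ ws.length) {i : Int} (h0 : 0 ≤ i) :
    ((pvLast ws).getD (PySem.List.pyGetD ws i 0 - pvD ws) (-1) > i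
      ∨ (pvLast ws).getD (PySem.List.pyGetD ws i 0 + pvD ws) (-1) > i)
    ↔ ∃ j ∈ PySem.List.pyRange (i + 1) ((ws.length : Int)) 1,
        ((fun j => pvF ws (i, j) == pvD ws) j) = true := by
  have hd := pvD_nonneg ws h2
  rw [pvLast_gt ws _ i h0, pvLast_gt ws _ i h0]
  constructor
  · rintro (⟨k, hk1, hk2⟩ | ⟨k, hk1, hk2⟩)
    all_goals {
      have hkl : k < ws.length := (List.getElem?_eq_some_iff.mp hk2).1
      have hg := pvGet?_pyGetD ws hk2
      refine ⟨(k : Int), PySem.List.mem_pyRange_one.mpr ⟨by omega, by exact_mod_cast hkl⟩, ?_⟩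
      show (pvF ws (i, (k : Int)) == pvD ws) = true
      simp only [beq_iff_eq, pvF]
      rw [hg, abs_eq hd]
      omega
    }
  · rintro ⟨j, hj, hq⟩
    have hj' := PySem.List.mem_pyRange_one.mp hj
    have hj0 : 0 ≤ j := by omega
    have hq' : |PySem.List.pyGetD ws i 0 - PySem.List.pyGetD ws j 0| = pvD ws := by
      simpa [pvF] using hq
    have hgj := pvWs_pyGetD_getElem? ws (i := j) hj0 hj'.2
    have hjt : ((j.toNat : Nat) : Int) = j := Int.toNat_of_nonneg hj0
    rcases (abs_eq hd).mp hq' with h | h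
    · left
      refine ⟨j.toNat, by omega, ?_⟩
      rw [hgj]
      have heq : PySem.List.pyGetD ws j 0 = PySem.List.pyGetD ws i 0 - pvD ws := by omega
      rw [heq]
    · right
      refine ⟨j.toNat, by omega, ?_⟩
      rw [hgj]
      have heq : PySem.List.pyGetD ws j 0 = PySem.List.pyGetD ws i 0 + pvD ws := by omega
      rw [heq]

-- ---- A's nested loop is the fold over the lexicographic pair list ----

lemma pvA_fold (ws : List Int) (init : Option Int × Int × Int) :
    (PySem.List.pyRange 0 ((ws.length : Int)) 1).foldl
      (fun (st : Option Int × Int × Int) i =>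
        (PySem.List.pyRange (i + 1) ((ws.length : Int)) 1).foldl
          (fun (st : Option Int × Int × Int) j => pvAbody ws st i j) st) init
    = (pvP ((ws.length : Int))).foldl (pvStep (pvF ws)) init := by
  rw [pvP, List.foldl_flatMap]
  simp only [List.foldl_map]
  rfl

-- ---- main theorem ----

theorem pv_main (boundaries : List Int) (roi_img : Option Int) :
    find_line_pairs boundaries roi_img = find_line_pairs_alt boundaries roi_img := by
  simp only [find_line_pairs, find_best_two_line_pairs, find_line_pairs_alt]
  split_ifs with h1 h2 h3
  · rfl
  · exfalso
    rw [List.length_map, List.length_map, PySem.List.length_pyRange_one] at h1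
    omega
  · exfalso
    rw [List.length_map, List.length_map, PySem.List.length_pyRange_one] at h1
    omega
  · -- main case: at least 3 boundaries
    have hn3 : 3 ≤ (boundaries.length : Int) := by omega
    have hAw : (List.map (fun p => p.2 - p.1)
        (List.map (fun i => (PySem.List.pyGetD boundaries i 0, PySem.List.pyGetD boundaries (i + 1) 0))
          (PySem.List.pyRange 0 ((boundaries.length : Int) - 1) 1)))
        = pvW boundaries := by
      rw [List.map_map]
      rfl
    have hBw : ((PySem.List.pyRange 0 ((boundaries.length : Int) - 1) 1).map
        (fun k => PySem.List.pyGetD boundaries (k + 1) 0 - PySem.List.pyGetD boundaries k 0))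
        = pvW boundaries := rfl
    rw [hAw, hBw]
    have hmN : (pvW boundaries).length = ((boundaries.length : Int) - 1).toNat := by
      rw [pvW, List.length_map, PySem.List.length_pyRange_one]
      omega
    have h2w : 2 ≤ (pvW boundaries).length := by omega
    have hmI : ((pvW boundaries).length : Int) = (boundaries.length : Int) - 1 := by omega
    -- fold B's sorted-gap minimum and last-occurrence dict into pvD / pvLast
    have hd : (PySem.List.min? ((PySem.List.pyRange 0 (((pvW boundaries).length : Int) - 1) 1).map
        (fun t => PySem.List.pyGetD (PySem.List.sorted (pvW boundaries) (fun x => x) false) (t + 1) 0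
                - PySem.List.pyGetD (PySem.List.sorted (pvW boundaries) (fun x => x) false) t 0))
        (fun x => x)).getD 0 = pvD (pvW boundaries) := rfl
    have hlast : ((PySem.List.enumerate (pvW boundaries) 0).foldl
        (fun (dd : PySem.Dict Int Int) kw => dd.insert kw.2 kw.1) PySem.Dict.empty)
        = pvLast (pvW boundaries) := rfl
    rw [hd, hlast, pvA_fold]
    -- characterize A's loop result
    have hPne : pvP (((pvW boundaries).length : Int)) ≠ [] := by
      intro hnil
      have h01 : ((0 : Int), (1 : Int)) ∈ pvP (((pvW boundaries).length : Int)) :=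
        pvMem_P.mpr ⟨by show (0:Int) ≤ 0; omega, by show (0:Int) < 1; omega,
          by show (1:Int) < ((pvW boundaries).length : Int); omega⟩
      rw [hnil] at h01
      simp at h01
    obtain ⟨Mv, pstar, hmin, hfind, hfold⟩ :=
      pvFoldA_main (pvF (pvW boundaries)) (pvP (((pvW boundaries).length : Int))) hPne (0, 1)
    have hMv : Mv = pvD (pvW boundaries) := by
      have hh := pvMinP (pvW boundaries) h2w
      rw [hmin] at hh
      exact Option.some.inj hh
    rw [hMv] at hfind hfold
    -- decompose the first achiever into (first i, first j)
    rw [pvP, pvFind?_flatMap] at hfind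
    simp only [List.find?_map, Function.comp_def] at hfind
    rw [pvFindSome?_map (l := PySem.List.pyRange 0 (((pvW boundaries).length : Int)) 1)
      (F := fun i => (PySem.List.pyRange (i + 1) (((pvW boundaries).length : Int)) 1).find?
        (fun j => pvF (pvW boundaries) (i, j) == pvD (pvW boundaries)))
      (h := fun i j => (i, j))] at hfind
    cases houter : (PySem.List.pyRange 0 (((pvW boundaries).length : Int)) 1).find?
        (fun i => ((PySem.List.pyRange (i + 1) (((pvW boundaries).length : Int)) 1).find?
          (fun j => pvF (pvW boundaries) (i, j) == pvD (pvW boundaries))).isSome) with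
    | none => rw [houter] at hfind; simp at hfind
    | some i0 =>
    rw [houter] at hfind
    simp only [Option.elim_some] at hfind
    cases hinner : (PySem.List.pyRange (i0 + 1) (((pvW boundaries).length : Int)) 1).find?
        (fun j => pvF (pvW boundaries) (i0, j) == pvD (pvW boundaries)) with
    | none => rw [hinner] at hfind; simp at hfind
    | some j0 =>
    rw [hinner] at hfind
    simp only [Option.map_some] at hfind
    have hps : pstar = (i0, j0) := (Option.some.inj hfind).symm
    rw [hps] at hfold
    -- bounds for i0 and j0
    have hi0 := PySem.List.mem_pyRange_one.mp (List.mem_of_find?_eq_some houter)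
    have hj0 := PySem.List.mem_pyRange_one.mp (List.mem_of_find?_eq_some hinner)
    -- B's outer scan finds the same i0
    have hcond : ∀ a ∈ PySem.List.pyRange 0 (((pvW boundaries).length : Int)) 1,
        (fun i => decide ((pvLast (pvW boundaries)).getD
            (PySem.List.pyGetD (pvW boundaries) i 0 - pvD (pvW boundaries)) (-1) > i
          ∨ (pvLast (pvW boundaries)).getD
            (PySem.List.pyGetD (pvW boundaries) i 0 + pvD (pvW boundaries)) (-1) > i)) a
        = (fun i => ((PySem.List.pyRange (i + 1) (((pvW boundaries).length : Int)) 1).find?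
            (fun j => pvF (pvW boundaries) (i, j) == pvD (pvW boundaries))).isSome) a := by
      intro a ha
      beta_reduce
      have ha' := PySem.List.mem_pyRange_one.mp ha
      have hiff := pvCond_iff (pvW boundaries) h2w (i := a) ha'.1
      cases hr : ((PySem.List.pyRange (a + 1) (((pvW boundaries).length : Int)) 1).find?
          (fun j => pvF (pvW boundaries) (a, j) == pvD (pvW boundaries))).isSome
      · refine decide_eq_false ?_
        rw [hiff]
        intro hex
        have hs := List.find?_isSome.mpr hex
        rw [hr] at hs
        simp at hs
      · exact decide_eq_true (hiff.mpr (List.find?_isSome.mp hr))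
    have hbiB : ((PySem.List.pyRange 0 (((pvW boundaries).length : Int)) 1).find?
        (fun i => decide ((pvLast (pvW boundaries)).getD
            (PySem.List.pyGetD (pvW boundaries) i 0 - pvD (pvW boundaries)) (-1) > i
          ∨ (pvLast (pvW boundaries)).getD
            (PySem.List.pyGetD (pvW boundaries) i 0 + pvD (pvW boundaries)) (-1) > i))) = some i0 := by
      rw [pvFind?_congr _ _ _ hcond]
      exact houter
    rw [hbiB]
    simp only [Option.getD_some]
    -- B's inner scan finds the same j0
    have hpe : (fun j => |PySem.List.pyGetD (pvW boundaries) i0 0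
          - PySem.List.pyGetD (pvW boundaries) j 0| == pvD (pvW boundaries))
        = (fun j => pvF (pvW boundaries) (i0, j) == pvD (pvW boundaries)) := rfl
    rw [hpe, hinner]
    simp only [Option.getD_some]
    -- evaluate A's pair list at i0 and j0
    rw [hfold]
    simp only []
    have hp1 : PySem.List.pyGetD ((PySem.List.pyRange 0 ((boundaries.length : Int) - 1) 1).map
        (fun i => (PySem.List.pyGetD boundaries i 0, PySem.List.pyGetD boundaries (i + 1) 0)))
        i0 ((0 : Int), (0 : Int))
        = (PySem.List.pyGetD boundaries i0 0, PySem.List.pyGetD boundaries (i0 + 1) 0) :=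
      PySem.List.pyGetD_map_pyRange_of_nonneg _ _ _ _ (by omega) (by omega)
    have hp2 : PySem.List.pyGetD ((PySem.List.pyRange 0 ((boundaries.length : Int) - 1) 1).map
        (fun i => (PySem.List.pyGetD boundaries i 0, PySem.List.pyGetD boundaries (i + 1) 0)))
        j0 ((0 : Int), (0 : Int))
        = (PySem.List.pyGetD boundaries j0 0, PySem.List.pyGetD boundaries (j0 + 1) 0) :=
      PySem.List.pyGetD_map_pyRange_of_nonneg _ _ _ _ (by omega) (by omega)
    rw [hp1, hp2]

-- ===== VERDICT (by name: the statement is the Claim_ definition above) =====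
theorem find_line_pairs_spec : Claim_equal_find_line_pairs := by
  intro boundaries roi_img _
  exact pv_main boundaries roi_img
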